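-- pv_equiv track=rewrite | github.com/pypi-data/pypi-mirror-400 | packages/kodit/kodit-0.5.18.tar.gz/kodit-0.5.18/src/kodit/infrastructure/physical_architecture/detectors/docker_compose_detector.py | _infer_protocol_description
-- ===== SOURCE A (Python) =====
-- def _infer_protocol_description(ports: list[int]) -> str:
--     """Infer protocol information from ports and return descriptive text."""
--     protocols = []
--
--     # HTTP ports
--     http_ports = {80, 8080, 3000, 4200, 5000, 8000, 8443, 443}
--     if any(port in http_ports for port in ports):
--         protocols.append("HTTP/HTTPS web traffic")
--
--     # gRPC ports
--     grpc_ports = {9090, 50051}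
--     if any(port in grpc_ports for port in ports):
--         protocols.append("gRPC API communication")
--
--     # Cache/Redis ports
--     if 6379 in ports:
--         protocols.append("cache service")
--
--     # Database ports (excluding Redis which is handled above)
--     db_ports = {5432, 3306, 27017}
--     if any(port in db_ports for port in ports):
--         protocols.append("database service")
--
--     if protocols:
--         return " and ".join(protocols)
--     if ports:
--         return "TCP-based service communication"
--     return ""
-- ===== SOURCE B (Python) =====
-- # Single pass over ports with one port->category table; categories emitted in fixed canonical order.
-- _PORT_CATEGORY = {
--     80: "HTTP/HTTPS web traffic", 8080: "HTTP/HTTPS web traffic",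
--     3000: "HTTP/HTTPS web traffic", 4200: "HTTP/HTTPS web traffic",
--     5000: "HTTP/HTTPS web traffic", 8000: "HTTP/HTTPS web traffic",
--     8443: "HTTP/HTTPS web traffic", 443: "HTTP/HTTPS web traffic",
--     9090: "gRPC API communication", 50051: "gRPC API communication",
--     6379: "cache service",
--     5432: "database service", 3306: "database service", 27017: "database service",
-- }
-- _ORDER = [
--     "HTTP/HTTPS web traffic",
--     "gRPC API communication",
--     "cache service",
--     "database service",
-- ]
--
--
-- def _infer_protocol_description(ports: list[int]) -> str:
--     seen = set()
--     for p in ports: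
--         cat = _PORT_CATEGORY.get(p)
--         if cat is not None:
--             seen.add(cat)
--     names = [c for c in _ORDER if c in seen]
--     if names:
--         return " and ".join(names)
--     return "TCP-based service communication" if ports else ""
-- ===== Notes on version B (the rewrite author's own statement) =====
-- stated objective: faster
-- what changed: Replaced A's four separate any()-scans over ports (one per protocol family) with a single pass over ports using one prebuilt port-to-category dict, collecting seen categories in a set and emitting them in the fixed canonical order.
import Mathlib
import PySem

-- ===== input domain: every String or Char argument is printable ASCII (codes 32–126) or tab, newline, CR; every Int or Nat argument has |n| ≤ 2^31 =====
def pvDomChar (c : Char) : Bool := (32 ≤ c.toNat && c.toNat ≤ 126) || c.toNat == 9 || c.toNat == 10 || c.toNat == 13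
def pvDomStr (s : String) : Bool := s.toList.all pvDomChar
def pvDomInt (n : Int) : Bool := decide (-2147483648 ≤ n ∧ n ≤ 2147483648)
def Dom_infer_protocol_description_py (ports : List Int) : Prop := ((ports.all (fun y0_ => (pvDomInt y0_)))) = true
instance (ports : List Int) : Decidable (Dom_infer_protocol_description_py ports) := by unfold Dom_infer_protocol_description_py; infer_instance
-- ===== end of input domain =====

-- B replaces A's four separate any()-scans over `ports` by one pass with a prebuilt port→category table; same result, single traversal.

-- ===== PORT A =====
def pvHttpPorts : PySem.Set Int := PySem.Set.ofList [80, 8080, 3000, 4200, 5000, 8000, 8443, 443]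
def pvGrpcPorts : PySem.Set Int := PySem.Set.ofList [9090, 50051]
def pvDbPorts : PySem.Set Int := PySem.Set.ofList [5432, 3306, 27017]

def infer_protocol_description_py (ports : List Int) : String :=
  let protocols : List String := []
  let protocols := if ports.any (fun p => PySem.Set.contains pvHttpPorts p)
    then protocols ++ ["HTTP/HTTPS web traffic"] else protocols
  let protocols := if ports.any (fun p => PySem.Set.contains pvGrpcPorts p)
    then protocols ++ ["gRPC API communication"] else protocols
  let protocols := if ports.contains (6379 : Int)
    then protocols ++ ["cache service"] else protocols
  let protocols := if ports.any (fun p => PySem.Set.contains pvDbPorts p)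
    then protocols ++ ["database service"] else protocols
  if protocols ≠ [] then PySem.Str.join " and " protocols
  else if ports ≠ [] then "TCP-based service communication"
  else ""

-- ===== PORT B =====
def pvPortCategory : PySem.Dict Int String := PySem.Dict.ofList
  [(80, "HTTP/HTTPS web traffic"), (8080, "HTTP/HTTPS web traffic"),
   (3000, "HTTP/HTTPS web traffic"), (4200, "HTTP/HTTPS web traffic"),
   (5000, "HTTP/HTTPS web traffic"), (8000, "HTTP/HTTPS web traffic"),
   (8443, "HTTP/HTTPS web traffic"), (443, "HTTP/HTTPS web traffic"),
   (9090, "gRPC API communication"), (50051, "gRPC API communication"),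
   (6379, "cache service"),
   (5432, "database service"), (3306, "database service"), (27017, "database service")]

def pvOrder : List String :=
  ["HTTP/HTTPS web traffic", "gRPC API communication", "cache service", "database service"]

def infer_protocol_description_py_alt (ports : List Int) : String :=
  let seen : PySem.Set String := ports.foldl
    (fun s p => match pvPortCategory.get? p with
      | some cat => PySem.Set.add s cat
      | none => s) PySem.Set.empty
  let names := pvOrder.filter (fun c => PySem.Set.contains seen c)
  if names ≠ [] then PySem.Str.join " and " names
  else if ports ≠ [] then "TCP-based service communication"
  else ""

-- ===== PRECONDITION & SPEC =====
def Spec_infer_protocol_description_py (ports : List Int) (out : String) : Prop := out = infer_protocol_description_py_alt ports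
instance (ports : List Int) (out : String) : Decidable (Spec_infer_protocol_description_py ports out) := by unfold Spec_infer_protocol_description_py; infer_instance

-- ===== CLAIM (what is proved, stated in full; the proofs are below) =====
def Claim_equal_infer_protocol_description_py : Prop := ∀ (ports : List Int), Dom_infer_protocol_description_py ports → Spec_infer_protocol_description_py ports (infer_protocol_description_py ports)

-- ===== LEMMAS AND PROOFS =====

-- the table lookup, as the four membership tests A makes
lemma pvPortCategory_get?_eq (p : Int) :
    pvPortCategory.get? p =
      if PySem.Set.contains pvHttpPorts p then some "HTTP/HTTPS web traffic"
      else if PySem.Set.contains pvGrpcPorts p then some "gRPC API communication"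
      else if p = 6379 then some "cache service"
      else if PySem.Set.contains pvDbPorts p then some "database service"
      else none := by
  by_cases h1 : p = 80; · subst h1; decide
  by_cases h2 : p = 8080; · subst h2; decide
  by_cases h3 : p = 3000; · subst h3; decide
  by_cases h4 : p = 4200; · subst h4; decide
  by_cases h5 : p = 5000; · subst h5; decide
  by_cases h6 : p = 8000; · subst h6; decide
  by_cases h7 : p = 8443; · subst h7; decide
  by_cases h8 : p = 443; · subst h8; decide
  by_cases h9 : p = 9090; · subst h9; decide
  by_cases h10 : p = 50051; · subst h10; decide
  by_cases h11 : p = 6379; · subst h11; decide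
  by_cases h12 : p = 5432; · subst h12; decide
  by_cases h13 : p = 3306; · subst h13; decide
  by_cases h14 : p = 27017; · subst h14; decide
  have hmk : pvPortCategory = PySem.Dict.mk
      [(80, "HTTP/HTTPS web traffic"), (8080, "HTTP/HTTPS web traffic"),
       (3000, "HTTP/HTTPS web traffic"), (4200, "HTTP/HTTPS web traffic"),
       (5000, "HTTP/HTTPS web traffic"), (8000, "HTTP/HTTPS web traffic"),
       (8443, "HTTP/HTTPS web traffic"), (443, "HTTP/HTTPS web traffic"),
       (9090, "gRPC API communication"), (50051, "gRPC API communication"),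
       (6379, "cache service"),
       (5432, "database service"), (3306, "database service"), (27017, "database service")] := by
    decide
  simp [hmk, PySem.Dict.get?, pvHttpPorts, pvGrpcPorts, pvDbPorts, PySem.Set.ofList, PySem.Set.contains, h1, h2, h3, h4, h5, h6, h7,
    h8, h9, h10, h11, h12, h13, h14, Ne.symm h1, Ne.symm h2, Ne.symm h3, Ne.symm h4,
    Ne.symm h5, Ne.symm h6, Ne.symm h7, Ne.symm h8, Ne.symm h9, Ne.symm h10,
    Ne.symm h11, Ne.symm h12, Ne.symm h13, Ne.symm h14]

-- membership in the seen-set built by B's single pass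
lemma contains_fold (ports : List Int) (s : PySem.Set String) (c : String) :
    PySem.Set.contains
      (ports.foldl (fun s p => match pvPortCategory.get? p with
        | some cat => PySem.Set.add s cat
        | none => s) s) c
    = (PySem.Set.contains s c || ports.any (fun p => pvPortCategory.get? p == some c)) := by
  induction ports generalizing s with
  | nil => simp
  | cons h t ih =>
    simp only [List.foldl_cons, List.any_cons]
    cases hc : pvPortCategory.get? h with
    | none => rw [ih]; simp
    | some cat =>
      rw [ih]
      have hm : PySem.Set.contains (PySem.Set.add s cat) c
          = (PySem.Set.contains s c || c == cat) := by
        by_cases h1 : cat ∈ s <;> by_cases h2 : c = cat <;>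
          simp_all [PySem.Set.add, PySem.Set.contains]
      rw [hm]
      by_cases h2 : c = cat
      · simp [h2]
      · have e1 : (c == cat) = false := beq_eq_false_iff_ne.mpr h2
        have e2 : (cat == c) = false := beq_eq_false_iff_ne.mpr (Ne.symm h2)
        simp [e1, e2]

-- the table-hit tests, one per category, as A's membership tests
lemma beq_http (p : Int) :
    (pvPortCategory.get? p == some "HTTP/HTTPS web traffic") = PySem.Set.contains pvHttpPorts p := by
  rw [pvPortCategory_get?_eq]; split_ifs <;> simp_all [pvHttpPorts, pvGrpcPorts, pvDbPorts, PySem.Set.ofList] <;> omega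

lemma beq_grpc (p : Int) :
    (pvPortCategory.get? p == some "gRPC API communication") = PySem.Set.contains pvGrpcPorts p := by
  rw [pvPortCategory_get?_eq]; split_ifs <;> simp_all [pvHttpPorts, pvGrpcPorts, pvDbPorts, PySem.Set.ofList] <;> omega

lemma beq_cache (p : Int) :
    (pvPortCategory.get? p == some "cache service") = (p == 6379) := by
  rw [pvPortCategory_get?_eq]; split_ifs <;> simp_all [pvHttpPorts, pvGrpcPorts, pvDbPorts, PySem.Set.ofList] <;> omega

lemma beq_db (p : Int) :
    (pvPortCategory.get? p == some "database service") = PySem.Set.contains pvDbPorts p := by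
  rw [pvPortCategory_get?_eq]; split_ifs <;> simp_all [pvHttpPorts, pvGrpcPorts, pvDbPorts, PySem.Set.ofList] <;> omega

-- ===== VERDICT (by name: the statement is the Claim_ definition above) =====
theorem infer_protocol_description_py_spec : Claim_equal_infer_protocol_description_py := by
  intro ports _
  unfold Spec_infer_protocol_description_py
  unfold infer_protocol_description_py infer_protocol_description_py_alt
  simp only [pvOrder, List.filter_cons, List.filter_nil]
  simp only [contains_fold]
  simp only [beq_http, beq_grpc, beq_cache, beq_db]
  simp only [PySem.Set.contains, PySem.Set.empty, List.not_mem_nil, decide_false]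
  rw [show ports.contains (6379 : Int) = ports.any (fun p => p == 6379) from
    Eq.symm List.any_beq']
  rcases (ports.any fun p => List.contains pvHttpPorts p).eq_false_or_eq_true with h1 | h1 <;>
    rcases (ports.any fun p => List.contains pvGrpcPorts p).eq_false_or_eq_true with h2 | h2 <;>
      rcases (ports.any fun p => p == (6379 : Int)).eq_false_or_eq_true with h3 | h3 <;>
        rcases (ports.any fun p => List.contains pvDbPorts p).eq_false_or_eq_true with h4 | h4 <;>
          (simp only [h1, h2, h3, h4]; simp)
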